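-- pv_equiv track=rewrite | github.com/AngeloMan/algorithms-training-competitive-programming | OBI/treino/primeira fase/obi 2020/garamana.py | check
-- ===== SOURCE A (Python) =====
-- def check(a, b):
--     q = 0
--     d = {}
--     for c in a:
--         if not c in d:
--             d[c] = 0
--         d[c] += 1
--     for c in b:
--         if c == "*":
--             q += 1
--         else:
--             if not c in d or d[c] == 0:
--                 return "N"
--             d[c] -= 1
--     t = sum(d.values())
--
--     if q < t:
--         return "N"
--     return "S"
-- ===== SOURCE B (Python) =====
-- def check(a, b):
--     la, lb = list(a), list(b)
--     for c in set(lb):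
--         if c != "*" and lb.count(c) > la.count(c):
--             return "N"
--     return "S" if len(lb) >= len(la) else "N"
-- ===== Notes on version B (the rewrite author's own statement) =====
-- stated objective: simpler
-- what changed: Replaces A's sequential consuming scan (per-character decrement of a mutable count dict plus a final remaining-sum test) by a grouped per-distinct-character count comparison over set(b) followed by a single length comparison, since q < t reduces to len(a) > len(b) once every literal of b is available in a.
import Mathlib
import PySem

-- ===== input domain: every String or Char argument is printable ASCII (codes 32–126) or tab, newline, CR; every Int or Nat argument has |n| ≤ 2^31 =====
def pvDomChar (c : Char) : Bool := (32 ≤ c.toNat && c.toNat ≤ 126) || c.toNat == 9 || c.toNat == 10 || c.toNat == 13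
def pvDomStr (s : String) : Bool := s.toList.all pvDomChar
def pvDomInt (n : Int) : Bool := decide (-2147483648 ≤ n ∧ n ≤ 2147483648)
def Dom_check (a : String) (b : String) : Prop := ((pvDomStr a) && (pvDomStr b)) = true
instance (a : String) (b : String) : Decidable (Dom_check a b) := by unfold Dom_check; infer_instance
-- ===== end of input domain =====

-- B replaces A's sequential consuming scan (decrementing a count dict, then comparing the
-- remaining sum with the wildcard count) by a grouped per-distinct-character count comparison
-- plus a single length comparison; objective: simpler.

-- ===== PORT A =====
-- first loop of A: builds the count dict d over a
def checkBuild (l : List Char) : PySem.Dict Char Int :=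
  l.foldl (fun d c => (if d.contains c then d else d.insert c 0).modify c 0 (· + 1)) PySem.Dict.empty
  -- 'if not c in d: d[c] = 0' then 'd[c] += 1' (the key is present, so modify c 0 (·+1) is d[c] = d[c] + 1)

-- second loop of A with its early 'return "N"', then 't = sum(d.values())' and the final test
def checkLoop : List Char → Int → PySem.Dict Char Int → String
  | [], q, d => if q < d.values.sum then "N" else "S"
  | c :: rest, q, d =>
    if c = '*' then checkLoop rest (q + 1) d
    else if !d.contains c || d.getD c 0 == 0 then "N"
    else checkLoop rest q (d.modify c 0 (· - 1))  -- key present, so modify c 0 (·-1) is d[c] -= 1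

def check (a : String) (b : String) : String :=
  checkLoop b.toList 0 (checkBuild a.toList)

-- ===== PORT B =====
def check_alt (a : String) (b : String) : String :=
  let la := a.toList
  let lb := b.toList
  if (PySem.Set.ofList lb).any (fun c => !(c == '*') && decide (lb.count c > la.count c)) then "N"
  else if lb.length ≥ la.length then "S" else "N"

-- ===== PRECONDITION & SPEC =====
def Spec_check (a : String) (b : String) (out : String) : Prop := out = check_alt a b
instance (a : String) (b : String) (out : String) : Decidable (Spec_check a b out) := by unfold Spec_check; infer_instance

-- ===== CLAIM (what is proved, stated in full; the proofs are below) =====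
def Claim_equal_check : Prop := ∀ (a : String) (b : String), Dom_check a b → Spec_check a b (check a b)

-- ===== LEMMAS AND PROOFS =====

-- summing a function over a Nodup list after bumping it at one member bumps the sum
lemma sum_map_ite_add (l : List Char) (hl : l.Nodup) (c : Char) (hc : c ∈ l)
    (f : Char → Int) (δ : Int) :
    (l.map (fun x => if x = c then f x + δ else f x)).sum = (l.map f).sum + δ := by
  induction l with
  | nil => cases hc
  | cons y t ih =>
    have hy : y ∉ t := (List.nodup_cons.1 hl).1
    have hnt : t.Nodup := (List.nodup_cons.1 hl).2
    by_cases hyc : y = c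
    · subst hyc
      have hm : t.map (fun x => if x = y then f x + δ else f x) = t.map f := by
        apply List.map_congr_left
        intro x hx
        have hxy : x ≠ y := fun he => hy (he ▸ hx)
        simp [hxy]
      simp [hm]
      ring
    · have hc' : c ∈ t := (List.mem_cons.1 hc).resolve_left fun he => hyc he.symm
      simp only [List.map_cons, List.sum_cons, if_neg hyc, ih hnt hc']
      ring

-- modifying a present key keeps the key list
lemma keys_modify_present (d : PySem.Dict Char Int) (c : Char) (f : Int → Int)
    (hcont : d.contains c = true) : (d.modify c 0 f).keys = d.keys := by
  rw [PySem.Dict.keys_modify, PySem.Dict.keys_insert_of_contains _ _ hcont]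

-- modifying a present key changes the value sum by the change at that key
lemma sum_values_modify (d : PySem.Dict Char Int) (c : Char) (f : Int → Int)
    (hnd : d.keys.Nodup) (hcont : d.contains c = true) :
    (d.modify c 0 f).values.sum = d.values.sum + (f (d.getD c 0) - d.getD c 0) := by
  have hk := keys_modify_present d c f hcont
  have hmem : c ∈ d.keys := (PySem.Dict.contains_iff_mem_keys d c).1 hcont
  rw [PySem.Dict.values_eq_map_keys _ (hk ▸ hnd) 0, hk,
      PySem.Dict.values_eq_map_keys _ hnd 0]
  have hm : d.keys.map (fun k => (d.modify c 0 f).getD k 0)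
      = d.keys.map (fun x => if x = c then d.getD x 0 + (f (d.getD c 0) - d.getD c 0) else d.getD x 0) := by
    apply List.map_congr_left
    intro x _
    rw [PySem.Dict.getD_modify]
    by_cases hx : x = c <;> simp [hx]
  rw [hm, sum_map_ite_add d.keys hnd c hmem (fun x => d.getD x 0) _]

-- one step of A's building loop
lemma buildStep_spec (d : PySem.Dict Char Int) (c : Char) (hnd : d.keys.Nodup) :
    ((if d.contains c then d else d.insert c 0).modify c 0 (· + 1)).keys.Nodup ∧
    (∀ x, ((if d.contains c then d else d.insert c 0).modify c 0 (· + 1)).getD x 0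
        = d.getD x 0 + (if x = c then 1 else 0)) ∧
    ((if d.contains c then d else d.insert c 0).modify c 0 (· + 1)).values.sum
        = d.values.sum + 1 := by
  by_cases h : d.contains c = true
  · simp only [h, if_true]
    refine ⟨(keys_modify_present d c _ h) ▸ hnd, ?_, ?_⟩
    · intro x
      rw [PySem.Dict.getD_modify]
      by_cases hx : x = c <;> simp [hx]
    · rw [sum_values_modify d c _ hnd h]; ring
  · have h' : d.contains c = false := by simpa using h
    simp only [h', Bool.false_eq_true, if_false]
    have hc0 : d.getD c 0 = 0 := PySem.Dict.getD_of_not_contains d 0 h'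
    have hkeys : (d.insert c 0).keys = d.keys ++ [c] :=
      PySem.Dict.keys_insert_of_not_contains d 0 h'
    have hcnot : c ∉ d.keys := fun hm => by
      simp [(PySem.Dict.contains_iff_mem_keys d c).2 hm] at h'
    have hnd' : (d.insert c 0).keys.Nodup := by
      rw [hkeys, List.nodup_append]
      refine ⟨hnd, List.nodup_singleton c, ?_⟩
      intro a ha b hb
      rcases List.mem_singleton.1 hb
      exact fun h => hcnot (h ▸ ha)
    have hcont' : (d.insert c 0).contains c = true := PySem.Dict.contains_insert_self _ _ _
    refine ⟨(keys_modify_present _ c _ hcont') ▸ hnd', ?_, ?_⟩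
    · intro x
      rw [PySem.Dict.getD_modify]
      by_cases hx : x = c <;> simp [PySem.Dict.getD_insert, hx, hc0]
    · rw [sum_values_modify _ c _ hnd' hcont']
      have hv : (d.insert c 0).values.sum = d.values.sum := by
        simp only [PySem.Dict.values, PySem.Dict.items_insert_of_not_contains d 0 h']
        simp
      rw [hv, PySem.Dict.getD_insert_self]
      ring

-- A's first loop builds the counter of l: nodup keys, getD = count, values sum = length
lemma checkBuild_inv (l : List Char) : ∀ (d : PySem.Dict Char Int), d.keys.Nodup →
    (l.foldl (fun d c => (if d.contains c then d else d.insert c 0).modify c 0 (· + 1)) d).keys.Nodup ∧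
    (∀ x, (l.foldl (fun d c => (if d.contains c then d else d.insert c 0).modify c 0 (· + 1)) d).getD x 0
        = d.getD x 0 + l.count x) ∧
    (l.foldl (fun d c => (if d.contains c then d else d.insert c 0).modify c 0 (· + 1)) d).values.sum
        = d.values.sum + l.length := by
  induction l with
  | nil =>
    intro d hnd
    simp only [List.foldl_nil]
    exact ⟨hnd, fun x => by simp, by simp⟩
  | cons c t ih =>
    intro d hnd
    obtain ⟨h1, h2, h3⟩ := buildStep_spec d c hnd
    obtain ⟨g1, g2, g3⟩ := ih _ h1
    rw [List.foldl_cons]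
    refine ⟨g1, ?_, ?_⟩
    · intro x
      rw [g2 x, h2 x, List.count_cons]
      by_cases hx : x = c
      · subst hx; simp; omega
      · have hcx : ¬c = x := fun h => hx h.symm
        simp [hx, hcx]
    · rw [g3, h3, List.length_cons]
      push_cast
      ring

-- A's second loop, characterised: "N" iff some needed character is short, else the q/t test
lemma checkLoop_spec (rest : List Char) : ∀ (q : Int) (d : PySem.Dict Char Int),
    d.keys.Nodup → (∀ x, 0 ≤ d.getD x 0) →
    checkLoop rest q d =
      if ∃ x ∈ rest, x ≠ '*' ∧ d.getD x 0 < (rest.count x : Int) then "N"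
      else if q + (rest.count '*' : Int) < d.values.sum - ((rest.length : Int) - (rest.count '*' : Int))
        then "N" else "S" := by
  induction rest with
  | nil =>
    intro q d hnd hpos
    simp [checkLoop]
  | cons c t ih =>
    intro q d hnd hpos
    by_cases hstar : c = '*'
    · subst hstar
      rw [checkLoop, if_pos rfl, ih (q + 1) d hnd hpos]
      have hex : (∃ x ∈ t, x ≠ '*' ∧ d.getD x 0 < (t.count x : Int))
               ↔ (∃ x ∈ '*' :: t, x ≠ '*' ∧ d.getD x 0 < ((('*' :: t).count x : Nat) : Int)) := by
        constructor
        · rintro ⟨x, hx, hne, hlt⟩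
          refine ⟨x, List.mem_cons_of_mem _ hx, hne, ?_⟩
          rwa [List.count_cons, if_neg (by simp only [beq_iff_eq]; exact fun h => hne h.symm), Nat.add_zero]
        · rintro ⟨x, hx, hne, hlt⟩
          rcases List.mem_cons.1 hx with rfl | hx'
          · exact absurd rfl hne
          · refine ⟨x, hx', hne, ?_⟩
            rwa [List.count_cons, if_neg (by simp only [beq_iff_eq]; exact fun h => hne h.symm), Nat.add_zero] at hlt
      rw [if_congr hex rfl rfl]
      have harith :
          (q + 1 + (t.count '*' : Int) < d.values.sum - ((t.length : Int) - (t.count '*' : Int)))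
        ↔ (q + ((('*' :: t).count '*' : Nat) : Int)
             < d.values.sum - (((('*' :: t).length : Nat) : Int) - ((('*' :: t).count '*' : Nat) : Int))) := by
        simp only [List.count_cons_self, List.length_cons]
        push_cast
        omega
      rw [if_congr harith rfl rfl]
    · by_cases hzero : (!d.contains c || d.getD c 0 == 0) = true
      · have hc0 : d.getD c 0 = 0 := by
          have hz := hzero
          rw [Bool.or_eq_true] at hz
          rcases hz with h | h
          · exact PySem.Dict.getD_of_not_contains d 0 (by simpa using h)
          · simpa using h
        rw [checkLoop, if_neg hstar, if_pos hzero]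
        have hw : ∃ x ∈ c :: t, x ≠ '*' ∧ d.getD x 0 < (((c :: t).count x : Nat) : Int) := by
          refine ⟨c, List.mem_cons_self, hstar, ?_⟩
          rw [hc0, List.count_cons_self]
          positivity
        rw [if_pos hw]
      · have hcd : d.contains c = true ∧ d.getD c 0 ≠ 0 := by
          have hz := hzero
          rw [Bool.or_eq_true] at hz
          constructor
          · rcases hcon : d.contains c with _ | _
            · exact absurd (Or.inl (by simp [hcon])) hz
            · rfl
          · intro h0
            exact hz (Or.inr (by simp [h0]))
        have hcont := hcd.1
        have hgt : 0 < d.getD c 0 := lt_of_le_of_ne (hpos c) (Ne.symm hcd.2)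
        have hk := keys_modify_present d c (· - 1) hcont
        have hnd' : (d.modify c 0 (· - 1)).keys.Nodup := hk ▸ hnd
        have hget' : ∀ x, (d.modify c 0 (· - 1)).getD x 0
            = if x = c then d.getD c 0 - 1 else d.getD x 0 := by
          intro x
          rw [PySem.Dict.getD_modify]
        have hpos' : ∀ x, 0 ≤ (d.modify c 0 (· - 1)).getD x 0 := by
          intro x
          rw [hget']
          by_cases hx : x = c
          · rw [if_pos hx]; omega
          · rw [if_neg hx]; exact hpos x
        have hsum' : (d.modify c 0 (· - 1)).values.sum = d.values.sum - 1 := by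
          rw [sum_values_modify d c _ hnd hcont]; ring
        rw [checkLoop, if_neg hstar, if_neg hzero, ih q _ hnd' hpos']
        have hex : (∃ x ∈ t, x ≠ '*' ∧ (d.modify c 0 (· - 1)).getD x 0 < (t.count x : Int))
                 ↔ (∃ x ∈ c :: t, x ≠ '*' ∧ d.getD x 0 < (((c :: t).count x : Nat) : Int)) := by
          constructor
          · rintro ⟨x, hx, hne, hlt⟩
            rw [hget'] at hlt
            by_cases hxc : x = c
            · subst hxc
              rw [if_pos rfl] at hlt
              refine ⟨x, List.mem_cons_self, hne, ?_⟩
              rw [List.count_cons_self]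
              push_cast
              omega
            · rw [if_neg hxc] at hlt
              refine ⟨x, List.mem_cons_of_mem _ hx, hne, ?_⟩
              rwa [List.count_cons, if_neg (by simp only [beq_iff_eq]; exact fun h => hxc h.symm),
                Nat.add_zero]
          · rintro ⟨x, hx, hne, hlt⟩
            by_cases hxc : x = c
            · subst hxc
              rw [List.count_cons_self] at hlt
              push_cast at hlt
              have hlt' : (d.modify x 0 (· - 1)).getD x 0 < (t.count x : Int) := by
                rw [hget', if_pos rfl]
                omega
              have hmem : x ∈ t := by
                by_contra hno
                have h0 : t.count x = 0 := List.count_eq_zero.2 hno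
                have h1 := hpos' x
                rw [h0] at hlt'
                push_cast at hlt'
                omega
              exact ⟨x, hmem, hne, hlt'⟩
            · rcases List.mem_cons.1 hx with h | hx'
              · exact absurd h hxc
              · refine ⟨x, hx', hne, ?_⟩
                rw [hget', if_neg hxc]
                rwa [List.count_cons, if_neg (by simp only [beq_iff_eq]; exact fun h => hxc h.symm),
                  Nat.add_zero] at hlt
        rw [if_congr hex rfl rfl]
        have harith :
            (q + (t.count '*' : Int)
               < (d.modify c 0 (· - 1)).values.sum - ((t.length : Int) - (t.count '*' : Int)))
          ↔ (q + (((c :: t).count '*' : Nat) : Int)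
               < d.values.sum - (((((c :: t).length : Nat)) : Int) - (((c :: t).count '*' : Nat) : Int))) := by
          rw [hsum', List.count_cons, if_neg (by simp [hstar]), Nat.add_zero, List.length_cons]
          push_cast
          omega
        rw [if_congr harith rfl rfl]

-- ===== VERDICT (by name: the statement is the Claim_ definition above) =====
theorem check_spec : Claim_equal_check := by
  unfold Claim_equal_check Spec_check
  intro a b _
  obtain ⟨hnd, hget, hsum⟩ :=
    checkBuild_inv a.toList PySem.Dict.empty PySem.Dict.nodup_keys_empty
  have hget' : ∀ x, (checkBuild a.toList).getD x 0 = (a.toList.count x : Int) := by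
    intro x
    rw [checkBuild, hget x, PySem.Dict.getD_empty]
    ring
  have hsum' : (checkBuild a.toList).values.sum = (a.toList.length : Int) := by
    rw [checkBuild, hsum]
    simp [PySem.Dict.empty, PySem.Dict.values]
  have hpos : ∀ x, 0 ≤ (checkBuild a.toList).getD x 0 := by
    intro x; rw [hget' x]; positivity
  rw [check, checkLoop_spec b.toList 0 (checkBuild a.toList) (by rw [checkBuild] at *; exact hnd) hpos]
  simp only [hget', hsum']
  rw [check_alt]
  have hany : ((PySem.Set.ofList b.toList).any
        (fun c => !(c == '*') && decide (b.toList.count c > a.toList.count c)) = true)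
      ↔ (∃ x ∈ b.toList, x ≠ '*' ∧ ((a.toList.count x : Int) < (b.toList.count x : Int))) := by
    simp only [List.any_eq_true, Bool.and_eq_true, Bool.not_eq_true', beq_eq_false_iff_ne,
      decide_eq_true_eq]
    constructor
    · rintro ⟨x, hx, hne, hlt⟩
      exact ⟨x, (PySem.Set.mem_ofList _ _).1 hx, hne, by exact_mod_cast hlt⟩
    · rintro ⟨x, hx, hne, hlt⟩
      exact ⟨x, (PySem.Set.mem_ofList _ _).2 hx, hne, by exact_mod_cast hlt⟩
  by_cases hv : ∃ x ∈ b.toList, x ≠ '*' ∧ ((a.toList.count x : Int) < (b.toList.count x : Int))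
  · rw [if_pos hv, if_pos (hany.2 hv)]
  · rw [if_neg hv, if_neg (fun h => hv (hany.1 h))]
    by_cases hlen : b.toList.length ≥ a.toList.length
    · rw [if_pos hlen, if_neg (by omega)]
    · rw [if_neg hlen, if_pos (by omega)]
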